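-- pv_equiv track=rewrite | github.com/Kiga-png/ba_dip_hunger | src/utils.py | _pairs_from_dotbracket
-- ===== SOURCE A (Python) =====
-- def _pairs_from_dotbracket(s: str):
--     """
--     Return list of base-pair tuples (i, j), 0-based, i<j.
--     """
--     if not isinstance(s, str):
--         return []
--     stack, pairs = [], []
--     for i, ch in enumerate(s):
--         if ch == "(":
--             stack.append(i)
--         elif ch == ")":
--             if stack:
--                 j = stack.pop()
--                 pairs.append((j, i))
--     pairs.sort()
--     return pairs
-- ===== SOURCE B (Python) =====
-- def _pairs_from_dotbracket(s: str):
--     """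
--     Return list of base-pair tuples (i, j), 0-based, i<j.
--     """
--     if not isinstance(s, str):
--         return []
--     # Depth-counter bucketing instead of a stack: at each nesting level the
--     # bracket events strictly alternate open/close, so the k-th '(' recorded at
--     # level d matches the k-th ')' that returns to level d; zip pairs them up.
--     opens, closes = {}, {}
--     d = 0
--     for i, ch in enumerate(s):
--         if ch == "(":
--             opens[d] = opens.get(d, []) + [i]
--             d += 1
--         elif ch == ")":
--             if d > 0:
--                 d -= 1
--                 closes[d] = closes.get(d, []) + [i]
--     pairs = []
--     for lvl, os in opens.items():
--         pairs.extend(zip(os, closes.get(lvl, [])))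
--     return sorted(pairs)
-- ===== Notes on version B (the rewrite author's own statement) =====
-- stated objective: alternative
-- what changed: B replaces the stack entirely: a single depth counter buckets opening indices and closing indices per nesting level, and since events at each level strictly alternate open/close, zipping each level's opens with its closes yields exactly the matched pairs, which are then sorted.
import Mathlib
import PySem

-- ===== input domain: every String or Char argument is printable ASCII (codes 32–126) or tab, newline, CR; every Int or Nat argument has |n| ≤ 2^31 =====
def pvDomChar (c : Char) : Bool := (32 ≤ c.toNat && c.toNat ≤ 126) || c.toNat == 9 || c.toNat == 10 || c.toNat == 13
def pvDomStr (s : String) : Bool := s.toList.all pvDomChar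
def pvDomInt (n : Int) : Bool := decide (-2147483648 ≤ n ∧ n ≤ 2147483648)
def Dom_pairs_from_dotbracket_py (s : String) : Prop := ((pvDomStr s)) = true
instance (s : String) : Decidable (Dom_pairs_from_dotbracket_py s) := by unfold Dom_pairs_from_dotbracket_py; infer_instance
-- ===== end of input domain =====

-- B drops the stack entirely: a depth counter buckets opening and closing indices per nesting
-- level and zips each level's opens with its closes (events at a level strictly alternate), then
-- sorts the collected pairs (objective: alternative).

-- ===== PORT A =====
-- the Python stack (append/pop at the end) is represented head-first: push = cons, pop = head
def pairs_from_dotbracket_py (s : String) : List (Int × Int) :=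
  -- 'if not isinstance(s, str): return []' cannot fire under the type convention (s is a str)
  let r := (PySem.List.enumerate s.toList 0).foldl
    (fun (st : List Int × List (Int × Int)) p =>
      if p.2 = '(' then (p.1 :: st.1, st.2)
      else if p.2 = ')' then
        match st.1 with
        | [] => st
        | j :: rest => (rest, st.2 ++ [(j, p.1)])
      else st) ([], [])
  PySem.List.sorted2 r.2 Prod.fst Prod.snd   -- pairs.sort(): lexicographic tuple order

-- ===== PORT B =====
-- state (d, opens, closes); 'opens[d] = opens.get(d, []) + [i]' is insert of getD ++ [i]
def pairs_from_dotbracket_py_alt (s : String) : List (Int × Int) :=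
  let r := (PySem.List.enumerate s.toList 0).foldl
    (fun (st : Int × PySem.Dict Int (List Int) × PySem.Dict Int (List Int)) p =>
      if p.2 = '(' then (st.1 + 1, st.2.1.insert st.1 (st.2.1.getD st.1 [] ++ [p.1]), st.2.2)
      else if p.2 = ')' then
        if st.1 > 0 then
          (st.1 - 1, st.2.1, st.2.2.insert (st.1 - 1) (st.2.2.getD (st.1 - 1) [] ++ [p.1]))
        else st
      else st) (0, PySem.Dict.empty, PySem.Dict.empty)
  -- for lvl, os in opens.items(): pairs.extend(zip(os, closes.get(lvl, [])))
  let pairs := r.2.1.items.foldl (fun acc q => acc ++ q.2.zip (r.2.2.getD q.1 [])) []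
  PySem.List.sorted2 pairs Prod.fst Prod.snd   -- sorted(pairs)

-- ===== PRECONDITION & SPEC =====
def Spec_pairs_from_dotbracket_py (s : String) (out : List (Int × Int)) : Prop := out = pairs_from_dotbracket_py_alt s
instance (s : String) (out : List (Int × Int)) : Decidable (Spec_pairs_from_dotbracket_py s out) := by unfold Spec_pairs_from_dotbracket_py; infer_instance

-- ===== CLAIM (what is proved, stated in full; the proofs are below) =====
def Claim_equal_pairs_from_dotbracket_py : Prop := ∀ (s : String), Dom_pairs_from_dotbracket_py s → Spec_pairs_from_dotbracket_py s (pairs_from_dotbracket_py s)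

-- ===== LEMMAS AND PROOFS =====

-- abbreviations for the two loop bodies (proof-side only)
def pvStepA (st : List Int × List (Int × Int)) (p : Int × Char) : List Int × List (Int × Int) :=
  if p.2 = '(' then (p.1 :: st.1, st.2)
  else if p.2 = ')' then
    match st.1 with
    | [] => st
    | j :: rest => (rest, st.2 ++ [(j, p.1)])
  else st

def pvStepB (st : Int × PySem.Dict Int (List Int) × PySem.Dict Int (List Int)) (p : Int × Char) :
    Int × PySem.Dict Int (List Int) × PySem.Dict Int (List Int) :=
  if p.2 = '(' then (st.1 + 1, st.2.1.insert st.1 (st.2.1.getD st.1 [] ++ [p.1]), st.2.2)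
  else if p.2 = ')' then
    if st.1 > 0 then
      (st.1 - 1, st.2.1, st.2.2.insert (st.1 - 1) (st.2.2.getD (st.1 - 1) [] ++ [p.1]))
    else st
  else st

-- the multiset of pairs B's second phase collects from bucket dicts O, C
def pvPairsOf (O C : PySem.Dict Int (List Int)) : List (Int × Int) :=
  O.items.flatMap (fun q => q.2.zip (C.getD q.1 []))

-- A's stack, reconstructed from B's opens buckets: top = last open of the deepest pending level
def pvStackOf (d : Nat) (O : PySem.Dict Int (List Int)) : List Int :=
  (List.range d).reverse.map (fun (l : Nat) => (O.getD (l : Int) []).getLast?.getD 0)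

theorem pvStackOf_succ (d : Nat) (O : PySem.Dict Int (List Int)) :
    pvStackOf (d + 1) O = ((O.getD (d : Int) []).getLast?.getD 0) :: pvStackOf d O := by
  simp [pvStackOf, List.range_succ]

theorem pvStackOf_congr (d : Nat) (O O' : PySem.Dict Int (List Int))
    (h : ∀ l : Nat, l < d → O'.getD (l : Int) [] = O.getD (l : Int) []) :
    pvStackOf d O' = pvStackOf d O := by
  unfold pvStackOf
  refine List.map_congr_left (fun l hl => ?_)
  have hld : l < d := by simpa using List.mem_reverse.mp hl
  rw [h l hld]

-- zip truncation: appending to the longer-by-none side changes nothing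
theorem pv_zip_snoc_left (o c : List Int) (x : Int) (h : o.length = c.length) :
    (o ++ [x]).zip c = o.zip c := by
  conv_lhs => rw [show c = c ++ [] by simp]
  rw [List.zip_append h]
  simp

-- zip when the left list is one longer: appending a close pairs it with the last open
theorem pv_zip_snoc_right (o c : List Int) (x : Int) (h : o.length = c.length + 1) :
    o.zip (c ++ [x]) = o.zip c ++ [(o.getLast?.getD 0, x)] := by
  induction c generalizing o with
  | nil =>
    match o, h with
    | [a], _ => simp
  | cons y t ih =>
    match o, h with
    | a :: o', h =>
      have h' : o'.length = t.length + 1 := by simpa using h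
      have hne : o' ≠ [] := by intro he; rw [he] at h'; simp at h'
      match o', hne with
      | b :: t', _ =>
        simp only [List.cons_append, List.zip_cons_cons, ih (b :: t') (by simpa using h')]
        simp

-- recording an open at a balanced level does not change the collected pairs
theorem pv_pairsOf_insert_open (O C : PySem.Dict Int (List Int)) (hOnd : O.keys.Nodup)
    (d n : Int) (hlen : (O.getD d []).length = (C.getD d []).length) :
    pvPairsOf (O.insert d (O.getD d [] ++ [n])) C = pvPairsOf O C := by
  by_cases hc : O.contains d = true
  · unfold pvPairsOf
    rw [PySem.Dict.items_insert_of_contains O _ hc, List.flatMap_map]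
    refine List.flatMap_congr (fun q hq => ?_)
    by_cases hqd : q.1 == d
    · have hqd' : q.1 = d := by simpa using hqd
      have hget : O.getD q.1 [] = q.2 := by
        have : (q.1, q.2) ∈ O.items := by simpa using hq
        exact PySem.Dict.getD_of_mem_items O this hOnd []
      simp only [hqd]
      simp only [← hqd', hget]
      exact pv_zip_snoc_left q.2 (C.getD q.1 []) n (by rw [← hget, hqd']; exact hlen)
    · simp [hqd]
  · have hget : O.getD d [] = [] := PySem.Dict.getD_of_not_contains O [] (by simpa using hc)
    have hc0 : C.getD d [] = [] := by
      rw [hget] at hlen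
      exact List.eq_nil_of_length_eq_zero (by simpa using hlen.symm)
    unfold pvPairsOf
    rw [PySem.Dict.items_insert_of_not_contains O _ (by simpa using hc)]
    simp [hget, hc0]

-- recording a close at a pending level appends the matching pair, up to permutation
theorem pv_pairsOf_insert_close (O C : PySem.Dict Int (List Int)) (hOnd : O.keys.Nodup)
    (d n : Int) (ho : O.getD d [] ≠ [])
    (hlen : (O.getD d []).length = (C.getD d []).length + 1) :
    (pvPairsOf O (C.insert d (C.getD d [] ++ [n]))).Perm
      (pvPairsOf O C ++ [((O.getD d []).getLast?.getD 0, n)]) := by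
  have hget : O.get? d = some (O.getD d []) := by
    cases h : O.get? d with
    | none => exact absurd (PySem.Dict.getD_of_get?_eq_none O [] h) ho
    | some v => rw [PySem.Dict.getD_of_get?_eq_some O [] h]
  have hmem : (d, O.getD d []) ∈ O.items := PySem.Dict.mem_items_of_get?_eq_some O hget
  obtain ⟨L1, L2, hsplit⟩ := List.mem_iff_append.mp hmem
  have hkeys : d ∉ L1.map Prod.fst ∧ d ∉ L2.map Prod.fst := by
    have hnd2 : ((L1 ++ (d, O.getD d []) :: L2).map Prod.fst).Nodup := by
      have hk : O.items.map Prod.fst = O.keys := rfl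
      rw [← hsplit, hk]; exact hOnd
    rw [List.map_append, List.map_cons] at hnd2
    rcases List.nodup_append.mp hnd2 with ⟨h1, h2, hdisj⟩
    exact ⟨fun hm => hdisj d hm d (by simp) rfl, (List.nodup_cons.mp h2).1⟩
  unfold pvPairsOf
  rw [hsplit]
  simp only [List.flatMap_append, List.flatMap_cons]
  have hL1 : L1.flatMap (fun q => q.2.zip ((C.insert d (C.getD d [] ++ [n])).getD q.1 []))
      = L1.flatMap (fun q => q.2.zip (C.getD q.1 [])) := by
    refine List.flatMap_congr (fun q hq => ?_)
    have : q.1 ≠ d := fun he => hkeys.1 (by rw [← he]; exact List.mem_map_of_mem hq)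
    rw [PySem.Dict.getD_insert_of_ne _ _ _ (this)]
  have hL2 : L2.flatMap (fun q => q.2.zip ((C.insert d (C.getD d [] ++ [n])).getD q.1 []))
      = L2.flatMap (fun q => q.2.zip (C.getD q.1 [])) := by
    refine List.flatMap_congr (fun q hq => ?_)
    have : q.1 ≠ d := fun he => hkeys.2 (by rw [← he]; exact List.mem_map_of_mem hq)
    rw [PySem.Dict.getD_insert_of_ne _ _ _ (this)]
  rw [hL1, hL2, PySem.Dict.getD_insert_self _ _ _ _,
    pv_zip_snoc_right (O.getD d []) (C.getD d []) n hlen]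
  set X := L1.flatMap (fun q => q.2.zip (C.getD q.1 []))
  set Y := (O.getD d []).zip (C.getD d [])
  set Z := L2.flatMap (fun q => q.2.zip (C.getD q.1 []))
  set a := ((O.getD d []).getLast?.getD 0, n)
  show (X ++ (Y ++ [a] ++ Z)).Perm (X ++ (Y ++ Z) ++ [a])
  simp only [List.append_assoc]
  refine List.Perm.append_left X ?_
  refine List.Perm.append_left Y ?_
  exact List.perm_append_comm

-- main correspondence: A's stack pass and B's depth-bucket pass collect the same pair multiset
theorem pv_loop_corr (cs : List Char) (n : Int) (stack : List Int) (pairs : List (Int × Int))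
    (O C : PySem.Dict Int (List Int))
    (hOnd : O.keys.Nodup)
    (hstack : stack = pvStackOf stack.length O)
    (hlen1 : ∀ l : Nat, l < stack.length →
      (O.getD (l : Int) []).length = (C.getD (l : Int) []).length + 1 ∧ O.getD (l : Int) [] ≠ [])
    (hlen2 : ∀ lvl : Int, ¬(0 ≤ lvl ∧ lvl < (stack.length : Int)) →
      (O.getD lvl []).length = (C.getD lvl []).length)
    (hperm : pairs.Perm (pvPairsOf O C)) :
    (((PySem.List.enumerate cs n).foldl pvStepA (stack, pairs)).2).Perm
      (pvPairsOf ((PySem.List.enumerate cs n).foldl pvStepB ((stack.length : Int), O, C)).2.1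
                 ((PySem.List.enumerate cs n).foldl pvStepB ((stack.length : Int), O, C)).2.2) := by
  induction cs generalizing n stack pairs O C with
  | nil => simpa using hperm
  | cons c t ih =>
    rw [PySem.List.enumerate_cons]
    simp only [List.foldl_cons]
    by_cases hc1 : c = '('
    · have hA : pvStepA (stack, pairs) (n, c) = (n :: stack, pairs) := by simp [pvStepA, hc1]
      have hB : pvStepB ((stack.length : Int), O, C) (n, c)
          = ((stack.length : Int) + 1,
             O.insert (stack.length : Int) (O.getD (stack.length : Int) [] ++ [n]), C) := by
        simp [pvStepB, hc1]
      rw [hA, hB]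
      set O' := O.insert (stack.length : Int) (O.getD (stack.length : Int) [] ++ [n]) with hO'
      have hlenbal : (O.getD (stack.length : Int) []).length
          = (C.getD (stack.length : Int) []).length := hlen2 _ (by omega)
      have hcast : (stack.length : Int) + 1 = ((n :: stack).length : Int) := by
        simp
      rw [hcast]
      refine ih (n + 1) (n :: stack) pairs O' C
        (PySem.Dict.nodup_keys_insert _ _ _ hOnd) ?_ ?_ ?_ ?_
      · -- stack shape
        show n :: stack = pvStackOf (stack.length + 1) O'
        rw [pvStackOf_succ]
        have h1 : O'.getD (stack.length : Int) [] = O.getD (stack.length : Int) [] ++ [n] := by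
          rw [hO', PySem.Dict.getD_insert_self _ _ _ _]
        have h2 : pvStackOf stack.length O' = pvStackOf stack.length O := by
          refine pvStackOf_congr _ _ _ (fun l hl => ?_)
          rw [hO', PySem.Dict.getD_insert_of_ne _ _ _ (by exact_mod_cast Nat.ne_of_lt hl)]
        rw [h1, h2, List.getLast?_concat, ← hstack]
        simp
      · -- hlen1 for levels below the new depth
        intro l hl
        simp only [List.length_cons] at hl
        rcases Nat.lt_succ_iff_lt_or_eq.mp hl with hl | hl
        · have hne : (l : Int) ≠ (stack.length : Int) := by exact_mod_cast Nat.ne_of_lt hl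
          rw [hO', PySem.Dict.getD_insert_of_ne _ _ _ (hne)]
          exact hlen1 l hl
        · subst hl
          rw [hO', PySem.Dict.getD_insert_self _ _ _ _]
          constructor
          · simp [hlenbal]
          · simp
      · -- hlen2 for levels at or above the new depth
        intro lvl hlvl
        simp only [List.length_cons] at hlvl
        have hne : lvl ≠ (stack.length : Int) := by
          intro he; subst he; push_cast at hlvl; omega
        rw [hO', PySem.Dict.getD_insert_of_ne _ _ _ (hne)]
        refine hlen2 lvl ?_
        intro hcon
        exact hlvl ⟨hcon.1, by push_cast; omega⟩
      · -- pair multiset unchanged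
        rw [pv_pairsOf_insert_open O C hOnd _ n hlenbal]
        exact hperm
    · by_cases hc2 : c = ')'
      · cases stack with
        | nil =>
          have hA : pvStepA (([] : List Int), pairs) (n, c) = ([], pairs) := by
            simp [pvStepA, hc2]
          have hB : pvStepB (((List.length ([] : List Int)) : Int), O, C) (n, c)
              = (((List.length ([] : List Int)) : Int), O, C) := by
            simp [pvStepB, hc2]
          rw [hA, hB]
          exact ih (n + 1) [] pairs O C hOnd hstack hlen1 hlen2 hperm
        | cons j rest =>
          have hA : pvStepA (j :: rest, pairs) (n, c) = (rest, pairs ++ [(j, n)]) := by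
            simp [pvStepA, hc2]
          have hB : pvStepB (((j :: rest).length : Int), O, C) (n, c)
              = (((j :: rest).length : Int) - 1, O,
                 C.insert (((j :: rest).length : Int) - 1)
                   (C.getD (((j :: rest).length : Int) - 1) [] ++ [n])) := by
            simp [pvStepB, hc2]
          rw [hA, hB]
          have hdl : ((j :: rest).length : Int) - 1 = (rest.length : Int) := by simp
          rw [hdl]
          set C' := C.insert (rest.length : Int) (C.getD (rest.length : Int) [] ++ [n]) with hC'
          have hl1 := hlen1 rest.length (by simp)
          -- the popped j is the last open recorded at the now-closed level
          have hj : j = (O.getD (rest.length : Int) []).getLast?.getD 0 := by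
            have := hstack
            rw [show (j :: rest).length = rest.length + 1 from rfl, pvStackOf_succ] at this
            exact (List.cons_eq_cons.mp this).1
          refine ih (n + 1) rest (pairs ++ [(j, n)]) O C' hOnd ?_ ?_ ?_ ?_
          · -- stack shape: the tail of the old reconstruction (C untouched in O)
            have := hstack
            rw [show (j :: rest).length = rest.length + 1 from rfl, pvStackOf_succ] at this
            exact (List.cons_eq_cons.mp this).2
          · intro l hl
            have hne : (l : Int) ≠ (rest.length : Int) := by exact_mod_cast Nat.ne_of_lt hl
            rw [hC', PySem.Dict.getD_insert_of_ne _ _ _ (hne)]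
            exact hlen1 l (by simp; omega)
          · intro lvl hlvl
            by_cases he : lvl = (rest.length : Int)
            · subst he
              rw [hC', PySem.Dict.getD_insert_self _ _ _ _]
              have h1 := hl1.1
              simp only [List.length_append, List.length_cons, List.length_nil]
              omega
            · rw [hC', PySem.Dict.getD_insert_of_ne _ _ _ (he)]
              refine hlen2 lvl ?_
              intro hcon
              rcases hcon with ⟨h0, hlt⟩
              refine hlvl ⟨h0, ?_⟩
              simp only [List.length_cons] at hlt
              push_cast at hlt ⊢
              rcases lt_or_eq_of_le (by omega : lvl ≤ (rest.length : Int)) with h | h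
              · omega
              · exact absurd h he
          · -- pairs ++ [(j,n)] is a permutation of the new buckets' pairs
            refine List.Perm.trans ?_ (pv_pairsOf_insert_close O C hOnd _ n hl1.2 hl1.1).symm
            rw [← hj]
            exact hperm.append_right [(j, n)]
      · have hA : pvStepA (stack, pairs) (n, c) = (stack, pairs) := by
          simp [pvStepA, hc1, hc2]
        have hB : pvStepB ((stack.length : Int), O, C) (n, c) = ((stack.length : Int), O, C) := by
          simp [pvStepB, hc1, hc2]
        rw [hA, hB]
        exact ih (n + 1) stack pairs O C hOnd hstack hlen1 hlen2 hperm

-- A-side: the recorded opening indices (pair firsts) stay distinct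
theorem pv_A_nodup (cs : List Char) (n : Int) (stack : List Int) (pairs : List (Int × Int))
    (hb : ∀ x ∈ stack ++ pairs.map Prod.fst, x < n)
    (hnd : (stack ++ pairs.map Prod.fst).Nodup) :
    ((((PySem.List.enumerate cs n).foldl pvStepA (stack, pairs)).2).map Prod.fst).Nodup := by
  induction cs generalizing n stack pairs with
  | nil => exact ((List.nodup_append.mp hnd).2.1)
  | cons c t ih =>
    rw [PySem.List.enumerate_cons]
    simp only [List.foldl_cons]
    by_cases hc1 : c = '('
    · have hA : pvStepA (stack, pairs) (n, c) = (n :: stack, pairs) := by simp [pvStepA, hc1]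
      rw [hA]
      refine ih (n + 1) (n :: stack) pairs ?_ ?_
      · intro x hx
        simp only [List.cons_append, List.mem_cons] at hx
        rcases hx with h | h
        · subst h; omega
        · have := hb x h; omega
      · simp only [List.cons_append, List.nodup_cons]
        refine ⟨fun hm => ?_, hnd⟩
        have := hb n hm; omega
    · by_cases hc2 : c = ')'
      · cases stack with
        | nil =>
          have hA : pvStepA (([] : List Int), pairs) (n, c) = ([], pairs) := by
            simp [pvStepA, hc2]
          rw [hA]
          refine ih (n + 1) [] pairs ?_ hnd
          intro x hx
          have := hb x hx; omega
        | cons j rest =>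
          have hA : pvStepA (j :: rest, pairs) (n, c) = (rest, pairs ++ [(j, n)]) := by
            simp [pvStepA, hc2]
          rw [hA]
          have hp : ((j :: rest) ++ pairs.map Prod.fst).Perm
              (rest ++ ((pairs ++ [(j, n)]).map Prod.fst)) := by
            simp only [List.map_append, List.map_cons, List.map_nil, List.cons_append]
            refine List.Perm.trans (List.perm_append_singleton j (rest ++ pairs.map Prod.fst)).symm ?_
            simp [List.append_assoc]
          refine ih (n + 1) rest (pairs ++ [(j, n)]) ?_ (hp.nodup hnd)
          intro x hx
          have hx' : x ∈ (j :: rest) ++ pairs.map Prod.fst := (hp.mem_iff).mpr hx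
          have := hb x hx'; omega
      · have hA : pvStepA (stack, pairs) (n, c) = (stack, pairs) := by
          simp [pvStepA, hc1, hc2]
        rw [hA]
        refine ih (n + 1) stack pairs ?_ hnd
        intro x hx
        have := hb x hx; omega

-- insertBy only looks at 'before x y' for y in the list
theorem pv_insertBy_congr (p q : Int × Int → Int × Int → Bool) (x : Int × Int)
    (ys : List (Int × Int)) (h : ∀ y ∈ ys, p x y = q x y) :
    PySem.List.insertBy p x ys = PySem.List.insertBy q x ys := by
  induction ys with
  | nil => rfl
  | cons y t ih =>
    simp only [PySem.List.insertBy]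
    rw [h y (by simp)]
    by_cases hb : q x y = true <;> simp [hb, ih (fun z hz => h z (by simp [hz]))]

theorem pv_mem_insertBy' (p : Int × Int → Int × Int → Bool) (x y : Int × Int)
    (ys : List (Int × Int)) (h : y ∈ PySem.List.insertBy p x ys) : y = x ∨ y ∈ ys := by
  have := PySem.List.mem_insertBy (before := p) (x := x) (ys := ys) (y := y)
  tauto

theorem pv_foldl_insertBy_congr (p q : Int × Int → Int × Int → Bool)
    (xs acc : List (Int × Int))
    (h : ∀ a, (a ∈ xs ∨ a ∈ acc) → ∀ b, (b ∈ xs ∨ b ∈ acc) → p a b = q a b) :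
    xs.foldl (fun ac x => PySem.List.insertBy p x ac) acc
      = xs.foldl (fun ac x => PySem.List.insertBy q x ac) acc := by
  induction xs generalizing acc with
  | nil => rfl
  | cons x t ih =>
    simp only [List.foldl_cons]
    rw [pv_insertBy_congr p q x acc (fun y hy => h x (by simp) y (Or.inr hy))]
    exact ih (PySem.List.insertBy q x acc)
      (fun a ha b hb => by
        refine h a ?_ b ?_
        · rcases ha with ha | ha
          · exact Or.inl (by simp [ha])
          · rcases pv_mem_insertBy' q x a acc ha with h' | h'
            · exact Or.inl (by simp [h'])
            · exact Or.inr h'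
        · rcases hb with hb | hb
          · exact Or.inl (by simp [hb])
          · rcases pv_mem_insertBy' q x b acc hb with h' | h'
            · exact Or.inl (by simp [h'])
            · exact Or.inr h')

-- when first components are distinct across the list, Python's tuple sort is the sort by first component
theorem pv_sorted2_eq_sorted (xs : List (Int × Int))
    (hinj : ∀ a ∈ xs, ∀ b ∈ xs, a.1 = b.1 → a = b) :
    PySem.List.sorted2 xs Prod.fst Prod.snd = PySem.List.sorted xs Prod.fst := by
  show xs.foldl (fun acc x => PySem.List.insertBy _ x acc) []
      = xs.foldl (fun acc x => PySem.List.insertBy _ x acc) []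
  refine pv_foldl_insertBy_congr _ _ xs [] (fun a ha b hb => ?_)
  simp only [List.mem_nil_iff, or_false] at ha hb
  by_cases h1 : a.1 < b.1
  · simp [h1]
  · by_cases h2 : b.1 < a.1
    · simp [h1, h2]
    · have : a = b := hinj a ha b hb (by omega)
      subst this
      simp

-- the ports, re-stated with the named loop bodies (definitional)
theorem pvA_eq (s : String) :
    pairs_from_dotbracket_py s
      = PySem.List.sorted2 ((PySem.List.enumerate s.toList 0).foldl pvStepA ([], [])).2
          Prod.fst Prod.snd := rfl

theorem pvB_eq (s : String) :
    pairs_from_dotbracket_py_alt s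
      = PySem.List.sorted2
          ((((PySem.List.enumerate s.toList 0).foldl pvStepB
              (0, PySem.Dict.empty, PySem.Dict.empty)).2.1.items).foldl
            (fun acc q => acc ++ q.2.zip
              (((PySem.List.enumerate s.toList 0).foldl pvStepB
                (0, PySem.Dict.empty, PySem.Dict.empty)).2.2.getD q.1 [])) [])
          Prod.fst Prod.snd := rfl

-- ===== VERDICT (by name: the statement is the Claim_ definition above) =====
theorem pairs_from_dotbracket_py_spec : Claim_equal_pairs_from_dotbracket_py := by
  unfold Claim_equal_pairs_from_dotbracket_py
  intro s _
  unfold Spec_pairs_from_dotbracket_py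
  rw [pvA_eq, pvB_eq]
  set pairsA := ((PySem.List.enumerate s.toList 0).foldl pvStepA ([], [])).2 with hA
  set B := (PySem.List.enumerate s.toList 0).foldl pvStepB (0, PySem.Dict.empty, PySem.Dict.empty) with hBdef
  -- B's collection loop is the flatMap pvPairsOf
  have hcollect : (B.2.1.items).foldl (fun acc q => acc ++ q.2.zip (B.2.2.getD q.1 [])) []
      = pvPairsOf B.2.1 B.2.2 := by
    rw [PySem.List.foldl_append_eq_flatMap]
    rfl
  rw [hcollect]
  -- the two passes collect the same multiset
  have hperm : pairsA.Perm (pvPairsOf B.2.1 B.2.2) := by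
    have := pv_loop_corr s.toList 0 [] [] PySem.Dict.empty PySem.Dict.empty
      (by simp) (by simp [pvStackOf]) (by simp) (by simp [PySem.Dict.getD_empty]) (by simp [pvPairsOf])
    simpa using this
  -- distinct firsts on A's side, hence on B's by permutation
  have hndA : (pairsA.map Prod.fst).Nodup := by
    have := pv_A_nodup s.toList 0 [] [] (by simp) (by simp)
    simpa using this
  have hndB : ((pvPairsOf B.2.1 B.2.2).map Prod.fst).Nodup :=
    ((hperm.map Prod.fst).nodup_iff).mp hndA
  have hinjA : ∀ a ∈ pairsA, ∀ b ∈ pairsA, a.1 = b.1 → a = b :=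
    fun a ha b hb he => List.inj_on_of_nodup_map hndA ha hb he
  have hinjB : ∀ a ∈ pvPairsOf B.2.1 B.2.2, ∀ b ∈ pvPairsOf B.2.1 B.2.2, a.1 = b.1 → a = b :=
    fun a ha b hb he => List.inj_on_of_nodup_map hndB ha hb he
  rw [pv_sorted2_eq_sorted _ hinjA, pv_sorted2_eq_sorted _ hinjB]
  -- both sorts produce the unique fst-increasing arrangement of the common multiset
  set L := PySem.List.sorted (pvPairsOf B.2.1 B.2.2) Prod.fst with hL
  have hLperm : L.Perm pairsA :=
    (PySem.List.sorted_perm _ _ _).trans hperm.symm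
  have hLle : L.Pairwise (fun a b => a.1 ≤ b.1) := PySem.List.sorted_pairwise _ _
  have hLnd : (L.map Prod.fst).Nodup :=
    (((PySem.List.sorted_perm (pvPairsOf B.2.1 B.2.2) Prod.fst false).map Prod.fst).nodup_iff).mpr hndB
  have hLlt : L.Pairwise (fun a b => a.1 < b.1) := by
    have hne : L.Pairwise (fun a b => a.1 ≠ b.1) := List.pairwise_map.mp hLnd
    exact (hLle.and hne).imp (fun h => lt_of_le_of_ne h.1 h.2)
  exact PySem.List.sorted_eq_of_perm_of_pairwise_lt _ _ _ hLperm hLlt
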